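-- pv_equiv track=rewrite | github.com/Kit0202/QR-Code-Generator | view/app/app.py | parse_vcard
-- ===== SOURCE A (Python) =====
-- def parse_vcard(vcard_str):
--     if not vcard_str:
--         return {}
--
--     vcard_info = {}
--     lines = [line.strip() for line in vcard_str.strip().split('\n') if line.strip()]  # Remove empty and whitespace-only lines
--     for line in lines:
--         if line.startswith('FN:'):
--             vcard_info['name'] = line[3:].strip()
--         elif line.startswith('TEL:'):
--             vcard_info['phone_number'] = line[4:].strip()
--         elif line.startswith('EMAIL:'):
--             vcard_info['email'] = line[6:].strip()
--         elif line.startswith('ADR:'):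
--             vcard_info['address'] = line[4:].strip()
--         elif line.startswith('ORG:'):
--             vcard_info['company'] = line[4:].strip()
--         elif line.startswith('TITLE:'):
--             vcard_info['job_title'] = line[6:].strip()
--         elif line.startswith('URL:'):
--             vcard_info['website'] = line[4:].strip()
--         elif line.startswith('BDAY:'):
--             vcard_info['birthday'] = line[5:].strip()
--         elif line.startswith('PHOTO;VALUE=URL:'):
--             vcard_info['image_url'] = line[16:].strip()  # Extract image URL from vCard
--     return vcard_info
-- ===== SOURCE B (Python) =====
-- _KEYS = {
--     "FN": "name",
--     "TEL": "phone_number",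
--     "EMAIL": "email",
--     "ADR": "address",
--     "ORG": "company",
--     "TITLE": "job_title",
--     "URL": "website",
--     "BDAY": "birthday",
--     "PHOTO;VALUE=URL": "image_url",
-- }
--
-- def parse_vcard(vcard_str):
--     # Split each line at its first ':' into (tag, value) and look the tag up in a
--     # dict; tags are exact, so this matches A's prefix chain without testing prefixes.
--     info = {}
--     for raw in vcard_str.strip().split('\n'):
--         tag, sep, value = raw.strip().partition(':')
--         if sep:
--             key = _KEYS.get(tag)
--             if key is not None:
--                 info[key] = value.strip()
--     return info
-- ===== Notes on version B (the rewrite author's own statement) =====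
-- stated objective: idiomatic
-- what changed: Instead of testing nine hard-coded prefixes per line, B partitions each line at its first colon and looks the exact tag up in a dict (the text before the first colon determines the field, so this matches A's prefix chain), and drops A's blank-line pre-filter and empty-string guard since blank lines match no tag.
import Mathlib
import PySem

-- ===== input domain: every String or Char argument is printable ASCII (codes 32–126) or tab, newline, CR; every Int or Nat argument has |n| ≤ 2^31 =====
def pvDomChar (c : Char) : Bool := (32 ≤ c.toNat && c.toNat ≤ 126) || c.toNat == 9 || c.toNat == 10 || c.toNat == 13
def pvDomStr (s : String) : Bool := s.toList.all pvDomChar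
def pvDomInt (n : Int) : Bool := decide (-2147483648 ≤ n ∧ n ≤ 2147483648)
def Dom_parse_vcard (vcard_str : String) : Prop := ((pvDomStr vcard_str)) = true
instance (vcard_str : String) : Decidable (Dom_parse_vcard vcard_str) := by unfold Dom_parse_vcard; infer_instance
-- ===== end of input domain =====

-- B replaces A's nine-branch prefix if/elif chain by partitioning each line at its
-- first ':' and looking the tag up in a dict (exact tag match, no prefix tests, no
-- pre-filtering of blank lines); idiomatic, same cost.


-- ===== PORT A =====
-- one pass of A's if/elif loop body (line already stripped)
def pvStepA (d : PySem.Dict String String) (line : String) : PySem.Dict String String :=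
  if PySem.Str.startswith line "FN:" then
    d.insert "name" (PySem.Str.strip (PySem.Str.slice line (some 3) none))
  else if PySem.Str.startswith line "TEL:" then
    d.insert "phone_number" (PySem.Str.strip (PySem.Str.slice line (some 4) none))
  else if PySem.Str.startswith line "EMAIL:" then
    d.insert "email" (PySem.Str.strip (PySem.Str.slice line (some 6) none))
  else if PySem.Str.startswith line "ADR:" then
    d.insert "address" (PySem.Str.strip (PySem.Str.slice line (some 4) none))
  else if PySem.Str.startswith line "ORG:" then
    d.insert "company" (PySem.Str.strip (PySem.Str.slice line (some 4) none))
  else if PySem.Str.startswith line "TITLE:" then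
    d.insert "job_title" (PySem.Str.strip (PySem.Str.slice line (some 6) none))
  else if PySem.Str.startswith line "URL:" then
    d.insert "website" (PySem.Str.strip (PySem.Str.slice line (some 4) none))
  else if PySem.Str.startswith line "BDAY:" then
    d.insert "birthday" (PySem.Str.strip (PySem.Str.slice line (some 5) none))
  else if PySem.Str.startswith line "PHOTO;VALUE=URL:" then
    d.insert "image_url" (PySem.Str.strip (PySem.Str.slice line (some 16) none))
  else d

def parse_vcard (vcard_str : String) : List (String × String) :=
  if vcard_str = "" then []
  else
    -- split? with nonempty sep "\n" always returns some
    (((((PySem.Str.split? (PySem.Str.strip vcard_str) "\n").getD []).map PySem.Str.strip).filter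
      (fun l => l ≠ "")).foldl pvStepA PySem.Dict.empty).items

-- ===== PORT B =====
-- Source B's _KEYS dict literal (distinct keys, insertion order)
def pvKeys : PySem.Dict (List Char) String :=
  PySem.Dict.mk
    [("FN".toList, "name"), ("TEL".toList, "phone_number"), ("EMAIL".toList, "email"),
     ("ADR".toList, "address"), ("ORG".toList, "company"), ("TITLE".toList, "job_title"),
     ("URL".toList, "website"), ("BDAY".toList, "birthday"),
     ("PHOTO;VALUE=URL".toList, "image_url")]

-- Source B's loop body on the char list of the stripped line; str.partition(':') is ported
-- by hand (exact): tag = chars before the first ':', 'sep found' ↔ tag shorter than the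
-- line, value = chars after that ':'.
def pvStepBC (d : PySem.Dict String String) (cs : List Char) : PySem.Dict String String :=
  let tag := cs.takeWhile (fun c => c != ':')
  if tag.length < cs.length then
    match pvKeys.get? tag with
    | some key => d.insert key (String.ofList (PySem.Chars.strip (cs.drop (tag.length + 1))))
    | none => d
  else d

def parse_vcard_alt (vcard_str : String) : List (String × String) :=
  (((PySem.Str.split? (PySem.Str.strip vcard_str) "\n").getD []).foldl
    (fun d raw => pvStepBC d (PySem.Str.strip raw).toList) PySem.Dict.empty).items

-- ===== PRECONDITION & SPEC =====
def Spec_parse_vcard (vcard_str : String) (out : List (String × String)) : Prop := out = parse_vcard_alt vcard_str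
instance (vcard_str : String) (out : List (String × String)) : Decidable (Spec_parse_vcard vcard_str out) := by unfold Spec_parse_vcard; infer_instance

-- ===== CLAIM (what is proved, stated in full; the proofs are below) =====
def Claim_equal_parse_vcard : Prop := ∀ (vcard_str : String), Dom_parse_vcard vcard_str → Spec_parse_vcard vcard_str (parse_vcard vcard_str)

-- ===== LEMMAS AND PROOFS =====
-- A's step, rephrased on the char list of the line (definitional: Str.* are wrappers)
def pvStepAC (d : PySem.Dict String String) (cs : List Char) : PySem.Dict String String :=
  if PySem.Chars.startswith cs "FN:".toList then
    d.insert "name" (String.ofList (PySem.Chars.strip (PySem.Chars.slice cs (some 3) none)))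
  else if PySem.Chars.startswith cs "TEL:".toList then
    d.insert "phone_number" (String.ofList (PySem.Chars.strip (PySem.Chars.slice cs (some 4) none)))
  else if PySem.Chars.startswith cs "EMAIL:".toList then
    d.insert "email" (String.ofList (PySem.Chars.strip (PySem.Chars.slice cs (some 6) none)))
  else if PySem.Chars.startswith cs "ADR:".toList then
    d.insert "address" (String.ofList (PySem.Chars.strip (PySem.Chars.slice cs (some 4) none)))
  else if PySem.Chars.startswith cs "ORG:".toList then
    d.insert "company" (String.ofList (PySem.Chars.strip (PySem.Chars.slice cs (some 4) none)))
  else if PySem.Chars.startswith cs "TITLE:".toList then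
    d.insert "job_title" (String.ofList (PySem.Chars.strip (PySem.Chars.slice cs (some 6) none)))
  else if PySem.Chars.startswith cs "URL:".toList then
    d.insert "website" (String.ofList (PySem.Chars.strip (PySem.Chars.slice cs (some 4) none)))
  else if PySem.Chars.startswith cs "BDAY:".toList then
    d.insert "birthday" (String.ofList (PySem.Chars.strip (PySem.Chars.slice cs (some 5) none)))
  else if PySem.Chars.startswith cs "PHOTO;VALUE=URL:".toList then
    d.insert "image_url" (String.ofList (PySem.Chars.strip (PySem.Chars.slice cs (some 16) none)))
  else d

theorem pvStepA_toChars (d : PySem.Dict String String) (l : String) :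
    pvStepA d l = pvStepAC d l.toList := by
  simp [pvStepA, pvStepAC, PySem.Str.startswith_eq, PySem.Str.strip, PySem.Str.slice]

theorem pvGetNone (t : List Char)
    (t1 : ¬ t = "FN".toList) (t2 : ¬ t = "TEL".toList) (t3 : ¬ t = "EMAIL".toList)
    (t4 : ¬ t = "ADR".toList) (t5 : ¬ t = "ORG".toList) (t6 : ¬ t = "TITLE".toList)
    (t7 : ¬ t = "URL".toList) (t8 : ¬ t = "BDAY".toList)
    (t9 : ¬ t = "PHOTO;VALUE=URL".toList) :
    pvKeys.get? t = none := by
  simp [pvKeys, PySem.Dict.get?, List.find?_eq_none]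
  exact ⟨Ne.symm t1, Ne.symm t2, Ne.symm t3, Ne.symm t4, Ne.symm t5, Ne.symm t6, Ne.symm t7,
    Ne.symm t8, Ne.symm t9⟩

theorem pvSplit (cs : List Char) (hf : (cs.takeWhile (fun c => c != ':')).length < cs.length) :
    ∃ rest, cs = cs.takeWhile (fun c => c != ':') ++ ':' :: rest := by
  have h := List.takeWhile_append_dropWhile (p := fun c => c != ':') (l := cs)
  have hne : cs.dropWhile (fun c => c != ':') ≠ [] := by
    intro h0
    have := congrArg List.length h
    simp [h0] at this
    omega
  have hhead : cs.dropWhile (fun c => c != ':') = ':' :: (cs.dropWhile (fun c => c != ':')).tail := by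
    conv_lhs => rw [← List.cons_head_tail hne]
    have := List.head_dropWhile_not (fun c => c != ':') hne
    simp at this
    rw [this]
  exact ⟨(cs.dropWhile (fun c => c != ':')).tail, by conv_lhs => rw [← h, hhead]⟩

theorem pvStep_eq (d : PySem.Dict String String) (cs : List Char) :
    pvStepBC d cs = pvStepAC d cs := by
  by_cases h1 : (['F', 'N', ':'] <+: cs)
  · obtain ⟨rest, hr⟩ := h1
    subst hr
    show pvStepBC d ('F'::'N'::':'::rest) = pvStepAC d ('F'::'N'::':'::rest)
    simp [pvStepBC, pvStepAC, pvKeys, PySem.Dict.get?, PySem.Chars.startswith,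
      List.isPrefixOf, PySem.Chars.slice, PySem.List.slice_from]
  by_cases h2 : (['T', 'E', 'L', ':'] <+: cs)
  · obtain ⟨rest, hr⟩ := h2
    subst hr
    show pvStepBC d ('T'::'E'::'L'::':'::rest) = pvStepAC d ('T'::'E'::'L'::':'::rest)
    simp [pvStepBC, pvStepAC, pvKeys, PySem.Dict.get?, PySem.Chars.startswith,
      List.isPrefixOf, PySem.Chars.slice, PySem.List.slice_from]
  by_cases h3 : (['E', 'M', 'A', 'I', 'L', ':'] <+: cs)
  · obtain ⟨rest, hr⟩ := h3
    subst hr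
    show pvStepBC d ('E'::'M'::'A'::'I'::'L'::':'::rest) = pvStepAC d ('E'::'M'::'A'::'I'::'L'::':'::rest)
    simp [pvStepBC, pvStepAC, pvKeys, PySem.Dict.get?, PySem.Chars.startswith,
      List.isPrefixOf, PySem.Chars.slice, PySem.List.slice_from]
  by_cases h4 : (['A', 'D', 'R', ':'] <+: cs)
  · obtain ⟨rest, hr⟩ := h4
    subst hr
    show pvStepBC d ('A'::'D'::'R'::':'::rest) = pvStepAC d ('A'::'D'::'R'::':'::rest)
    simp [pvStepBC, pvStepAC, pvKeys, PySem.Dict.get?, PySem.Chars.startswith,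
      List.isPrefixOf, PySem.Chars.slice, PySem.List.slice_from]
  by_cases h5 : (['O', 'R', 'G', ':'] <+: cs)
  · obtain ⟨rest, hr⟩ := h5
    subst hr
    show pvStepBC d ('O'::'R'::'G'::':'::rest) = pvStepAC d ('O'::'R'::'G'::':'::rest)
    simp [pvStepBC, pvStepAC, pvKeys, PySem.Dict.get?, PySem.Chars.startswith,
      List.isPrefixOf, PySem.Chars.slice, PySem.List.slice_from]
  by_cases h6 : (['T', 'I', 'T', 'L', 'E', ':'] <+: cs)
  · obtain ⟨rest, hr⟩ := h6
    subst hr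
    show pvStepBC d ('T'::'I'::'T'::'L'::'E'::':'::rest) = pvStepAC d ('T'::'I'::'T'::'L'::'E'::':'::rest)
    simp [pvStepBC, pvStepAC, pvKeys, PySem.Dict.get?, PySem.Chars.startswith,
      List.isPrefixOf, PySem.Chars.slice, PySem.List.slice_from]
  by_cases h7 : (['U', 'R', 'L', ':'] <+: cs)
  · obtain ⟨rest, hr⟩ := h7
    subst hr
    show pvStepBC d ('U'::'R'::'L'::':'::rest) = pvStepAC d ('U'::'R'::'L'::':'::rest)
    simp [pvStepBC, pvStepAC, pvKeys, PySem.Dict.get?, PySem.Chars.startswith,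
      List.isPrefixOf, PySem.Chars.slice, PySem.List.slice_from]
  by_cases h8 : (['B', 'D', 'A', 'Y', ':'] <+: cs)
  · obtain ⟨rest, hr⟩ := h8
    subst hr
    show pvStepBC d ('B'::'D'::'A'::'Y'::':'::rest) = pvStepAC d ('B'::'D'::'A'::'Y'::':'::rest)
    simp [pvStepBC, pvStepAC, pvKeys, PySem.Dict.get?, PySem.Chars.startswith,
      List.isPrefixOf, PySem.Chars.slice, PySem.List.slice_from]
  by_cases h9 : (['P', 'H', 'O', 'T', 'O', ';', 'V', 'A', 'L', 'U', 'E', '=', 'U', 'R', 'L', ':'] <+: cs)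
  · obtain ⟨rest, hr⟩ := h9
    subst hr
    show pvStepBC d ('P'::'H'::'O'::'T'::'O'::';'::'V'::'A'::'L'::'U'::'E'::'='::'U'::'R'::'L'::':'::rest) = pvStepAC d ('P'::'H'::'O'::'T'::'O'::';'::'V'::'A'::'L'::'U'::'E'::'='::'U'::'R'::'L'::':'::rest)
    simp [pvStepBC, pvStepAC, pvKeys, PySem.Dict.get?, PySem.Chars.startswith,
      List.isPrefixOf, PySem.Chars.slice, PySem.List.slice_from]
  -- no prefix matches: A's chain falls through and B's tag is not in the table
  have hA : pvStepAC d cs = d := by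
    simp [pvStepAC, PySem.Chars.startswith_iff, h1, h2, h3, h4, h5, h6, h7, h8, h9]
  rw [hA]
  by_cases hf : (cs.takeWhile (fun c => c != ':')).length < cs.length
  · obtain ⟨rest, hcs⟩ := pvSplit cs hf
    have hnone : pvKeys.get? (cs.takeWhile (fun c => c != ':')) = none := by
      by_cases t1 : List.takeWhile (fun c => c != ':') cs = "FN".toList
      · exact absurd ⟨rest, by rw [hcs, t1]; try rfl; try simp⟩ h1
      by_cases t2 : List.takeWhile (fun c => c != ':') cs = "TEL".toList
      · exact absurd ⟨rest, by rw [hcs, t2]; try rfl; try simp⟩ h2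
      by_cases t3 : List.takeWhile (fun c => c != ':') cs = "EMAIL".toList
      · exact absurd ⟨rest, by rw [hcs, t3]; try rfl; try simp⟩ h3
      by_cases t4 : List.takeWhile (fun c => c != ':') cs = "ADR".toList
      · exact absurd ⟨rest, by rw [hcs, t4]; try rfl; try simp⟩ h4
      by_cases t5 : List.takeWhile (fun c => c != ':') cs = "ORG".toList
      · exact absurd ⟨rest, by rw [hcs, t5]; try rfl; try simp⟩ h5
      by_cases t6 : List.takeWhile (fun c => c != ':') cs = "TITLE".toList
      · exact absurd ⟨rest, by rw [hcs, t6]; try rfl; try simp⟩ h6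
      by_cases t7 : List.takeWhile (fun c => c != ':') cs = "URL".toList
      · exact absurd ⟨rest, by rw [hcs, t7]; try rfl; try simp⟩ h7
      by_cases t8 : List.takeWhile (fun c => c != ':') cs = "BDAY".toList
      · exact absurd ⟨rest, by rw [hcs, t8]; try rfl; try simp⟩ h8
      by_cases t9 : List.takeWhile (fun c => c != ':') cs = "PHOTO;VALUE=URL".toList
      · exact absurd ⟨rest, by rw [hcs, t9]; try rfl; try simp⟩ h9
      exact pvGetNone _ t1 t2 t3 t4 t5 t6 t7 t8 t9
    simp [pvStepBC, hf, hnone]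
  · simp [pvStepBC, hf]

theorem pvStepA_nil (d : PySem.Dict String String) : pvStepA d "" = d := by rfl

theorem pvFoldFilter (xs : List String) (d : PySem.Dict String String) :
    (xs.filter (fun l => l ≠ "")).foldl pvStepA d = xs.foldl pvStepA d := by
  induction xs generalizing d with
  | nil => rfl
  | cons x t ih =>
    by_cases hx : x = ""
    · subst hx
      simpa [List.filter, pvStepA_nil] using ih d
    · rw [List.filter_cons_of_pos (by simp [hx]), List.foldl_cons, List.foldl_cons]
      exact ih _

-- ===== VERDICT (by name: the statement is the Claim_ definition above) =====
theorem parse_vcard_spec : Claim_equal_parse_vcard := by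
  intro s _
  unfold Spec_parse_vcard parse_vcard parse_vcard_alt
  by_cases hs : s = ""
  · subst hs; rfl
  · rw [if_neg hs, pvFoldFilter, List.foldl_map]
    have h : (fun d raw => pvStepA d (PySem.Str.strip raw)) =
        (fun d raw => pvStepBC d (PySem.Str.strip raw).toList) := by
      funext d raw
      rw [pvStepA_toChars, pvStep_eq]
    rw [h]
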